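-- pv_equiv track=rewrite | github.com/itayeliav/ScientificComputing | P1Q2.1 - Joined List On^2.py | join_lists
-- ===== SOURCE A (Python) =====
-- def insertion_sort(unsortedList):
--     for slot in range(1, len(unsortedList)):
--         value = unsortedList[slot]
--         test_slot = slot - 1
--         while test_slot > -1 and unsortedList[test_slot] > value:
--             unsortedList[test_slot + 1] = unsortedList[test_slot]
--             test_slot = test_slot - 1
--         unsortedList[test_slot + 1] = value
--     return unsortedList
--
-- def join_lists(unsortedList,sortedList):
--
--     unsortedList=insertion_sort(unsortedList) #sorts the first unsorted list in O(n^2)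
--     size_1 = len(unsortedList)
--     size_2 = len(sortedList)
--
--     joinedList = []
--     i, j = 0, 0
--
--     while i < size_1 and j < size_2:
--         if unsortedList[i] < sortedList[j]:
--             joinedList.append(unsortedList[i])
--             i += 1
--
--         else:
--             joinedList.append(sortedList[j])
--             j += 1
--
--     joinedList = joinedList + unsortedList[i:] + sortedList[j:]
--
--     return ("The combined sorted list is : " + str(joinedList))
-- ===== SOURCE B (Python) =====
-- def join_lists(unsortedList, sortedList):
--     # Timsort replaces the O(n^2) insertion sort; the in-place sort keeps A's
--     # mutation of unsortedList.  The merge consumes both sequences through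
--     # iterators (no indices, no slicing).
--     unsortedList.sort()
--     it1, it2 = iter(unsortedList), iter(sortedList)
--     a = next(it1, None)
--     b = next(it2, None)
--     joinedList = []
--     while a is not None and b is not None:
--         if a < b:
--             joinedList.append(a)
--             a = next(it1, None)
--         else:
--             joinedList.append(b)
--             b = next(it2, None)
--     if a is not None:
--         joinedList.append(a)
--         joinedList.extend(it1)
--     if b is not None:
--         joinedList.append(b)
--         joinedList.extend(it2)
--     return ("The combined sorted list is : " + str(joinedList))
-- ===== Notes on version B (the rewrite author's own statement) =====
-- stated objective: faster
-- what changed: Replaces the hand-written O(n^2) insertion sort with Python's built-in Timsort (list.sort, still in place) and rewrites the index-based merge loop as an iterator-driven merge with no index arithmetic or slicing.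
import Mathlib
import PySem

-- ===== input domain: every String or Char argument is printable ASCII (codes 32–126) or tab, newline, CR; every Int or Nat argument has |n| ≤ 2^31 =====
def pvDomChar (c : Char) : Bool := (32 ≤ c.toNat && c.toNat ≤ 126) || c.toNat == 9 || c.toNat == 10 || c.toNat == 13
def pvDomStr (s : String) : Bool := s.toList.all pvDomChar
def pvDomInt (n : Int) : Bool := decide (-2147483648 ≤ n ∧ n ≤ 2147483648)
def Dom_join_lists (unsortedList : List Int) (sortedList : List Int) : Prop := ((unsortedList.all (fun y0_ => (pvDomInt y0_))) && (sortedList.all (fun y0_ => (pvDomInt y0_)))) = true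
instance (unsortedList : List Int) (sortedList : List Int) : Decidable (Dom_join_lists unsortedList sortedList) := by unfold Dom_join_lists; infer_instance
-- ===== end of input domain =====

-- B replaces the O(n^2) insertion sort by the built-in sort and the index-based merge
-- loop by an iterator-driven merge; equivalence is about the RETURN value only (both
-- Pythons sort unsortedList in place, so the observable mutation is the same).

-- ===== PORT A =====
-- str(list of ints): shared rendering helper (both Pythons end with '+ str(joinedList)')
def pyReprIntList (l : List Int) : String :=
  "[" ++ PySem.Str.join ", " (l.map PySem.Int.toStr) ++ "]"

-- the inner 'while test_slot > -1 and unsortedList[test_slot] > value' shifting loop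
def insSortInner (l : List Int) (value : Int) (t : Int) : List Int × Int :=
  if h : t > -1 ∧ PySem.List.pyGetD l t 0 > value then
    insSortInner (PySem.List.pySetD l (t + 1) (PySem.List.pyGetD l t 0)) value (t - 1)
  else (l, t)
termination_by (t + 1).toNat
decreasing_by omega

-- one iteration of the outer 'for slot in range(1, len(unsortedList))' loop
def insSortStep (l : List Int) (slot : Int) : List Int :=
  let value := PySem.List.pyGetD l slot 0
  let r := insSortInner l value (slot - 1)
  PySem.List.pySetD r.1 (r.2 + 1) value

def insertion_sort (unsortedList : List Int) : List Int :=
  (PySem.List.pyRange 1 unsortedList.length 1).foldl insSortStep unsortedList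

-- the 'while i < size_1 and j < size_2' merge loop, returning (joinedList, i, j)
def mergeLoopA (u s : List Int) (size1 size2 : Int) (i j : Int) (acc : List Int) :
    List Int × Int × Int :=
  if _h : i < size1 ∧ j < size2 then
    if PySem.List.pyGetD u i 0 < PySem.List.pyGetD s j 0 then
      mergeLoopA u s size1 size2 (i + 1) j (acc ++ [PySem.List.pyGetD u i 0])
    else
      mergeLoopA u s size1 size2 i (j + 1) (acc ++ [PySem.List.pyGetD s j 0])
  else (acc, i, j)
termination_by ((size1 - i) + (size2 - j)).toNat
decreasing_by all_goals omega

def join_lists (unsortedList : List Int) (sortedList : List Int) : String :=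
  let u := insertion_sort unsortedList
  let size1 : Int := u.length
  let size2 : Int := sortedList.length
  let r := mergeLoopA u sortedList size1 size2 0 0 []
  let joinedList := r.1 ++ PySem.List.slice u (some r.2.1) none
      ++ PySem.List.slice sortedList (some r.2.2) none
  "The combined sorted list is : " ++ pyReprIntList joinedList

-- ===== PORT B =====
-- Source B's iterator merge: 'a'/'b' are the current heads, None = exhausted iterator;
-- rendered as structural recursion on the two lists of remaining elements.
def mergeB : List Int → List Int → List Int
  | [], ys => ys
  | x :: xs, [] => x :: xs
  | x :: xs, y :: ys =>
    if x < y then x :: mergeB xs (y :: ys) else y :: mergeB (x :: xs) ys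

def join_lists_alt (unsortedList : List Int) (sortedList : List Int) : String :=
  let u := PySem.List.sorted unsortedList (fun x => x) false   -- unsortedList.sort()
  "The combined sorted list is : " ++ pyReprIntList (mergeB u sortedList)

-- ===== PRECONDITION & SPEC =====
def Spec_join_lists (unsortedList : List Int) (sortedList : List Int) (out : String) : Prop := out = join_lists_alt unsortedList sortedList
instance (unsortedList : List Int) (sortedList : List Int) (out : String) : Decidable (Spec_join_lists unsortedList sortedList out) := by unfold Spec_join_lists; infer_instance

-- ===== CLAIM (what is proved, stated in full; the proofs are below) =====
def Claim_equal_join_lists : Prop := ∀ (unsortedList : List Int) (sortedList : List Int), Dom_join_lists unsortedList sortedList → Spec_join_lists unsortedList sortedList (join_lists unsortedList sortedList)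

-- ===== LEMMAS AND PROOFS =====

-- functional model of one insertion step: put v after the ties of the sorted prefix p
def insStep (p : List Int) (v : Int) : List Int :=
  p.takeWhile (fun b => decide (b ≤ v)) ++ v :: p.dropWhile (fun b => decide (b ≤ v))

lemma pySetD_append_cons (c : List Int) (y : Int) (r : List Int) (v : Int) :
    PySem.List.pySetD (c ++ y :: r) (c.length : Int) v = c ++ v :: r := by
  rw [PySem.List.pySetD_natCast]
  induction c with
  | nil => rfl
  | cons a c ih => simp [ih]

lemma pyGetD_append_cons (c : List Int) (y : Int) (r : List Int) :
    PySem.List.pyGetD (c ++ y :: r) (c.length : Int) 0 = y := by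
  rw [PySem.List.pyGetD_natCast]
  induction c with
  | nil => rfl
  | cons a c ih => simp [ih]

lemma takeWhile_snoc_neg (q : List Int) (b : Int) (P : Int → Bool) (hb : P b = false) :
    (q ++ [b]).takeWhile P = q.takeWhile P := by
  simp [List.takeWhile_append, hb]
  intro h
  exact ((List.takeWhile_prefix P).eq_of_length h).symm

lemma dropWhile_snoc_neg (q : List Int) (b : Int) (P : Int → Bool) (hb : P b = false) :
    (q ++ [b]).dropWhile P = q.dropWhile P ++ [b] := by
  simp [List.dropWhile_append, hb]

lemma inner_spec : ∀ (p : List Int), p.Pairwise (· ≤ ·) → ∀ (x : Int) (rest : List Int) (v : Int),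
    (fun r => PySem.List.pySetD r.1 (r.2 + 1) v)
        (insSortInner (p ++ x :: rest) v ((p.length : Int) - 1))
      = insStep p v ++ rest := by
  intro p
  induction p using List.reverseRecOn with
  | nil =>
    intro _ x rest v
    rw [insSortInner]
    have hcond : ¬ ((((List.length ([] : List Int) : Int)) - 1 > -1) ∧
        PySem.List.pyGetD ([] ++ x :: rest) (((List.length ([] : List Int) : Int)) - 1) 0 > v) := by
      simp
    rw [dif_neg hcond]
    show PySem.List.pySetD (x :: rest) ((0 : Int) - 1 + 1) v = insStep [] v ++ rest
    norm_num [PySem.List.pySetD_of_nonneg, insStep]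
  | append_singleton q b ih =>
    intro hp x rest v
    have hq : q.Pairwise (· ≤ ·) := (List.pairwise_append.mp hp).1
    have hqb : ∀ a ∈ q, a ≤ b := by
      intro a ha
      exact (List.pairwise_append.mp hp).2.2 a ha b (by simp)
    have hlen : ((q ++ [b]).length : Int) - 1 = (q.length : Int) := by
      simp
    have hget : PySem.List.pyGetD ((q ++ [b]) ++ x :: rest) ((q.length : Int)) 0 = b := by
      have : (q ++ [b]) ++ x :: rest = q ++ b :: (x :: rest) := by simp
      rw [this, pyGetD_append_cons]
    rw [insSortInner, hlen, hget]
    by_cases hbv : b ≤ v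
    · have hcond : ¬ (((q.length : Int) > -1) ∧ (b > v)) := by
        intro h; omega
      rw [dif_neg hcond]
      show PySem.List.pySetD ((q ++ [b]) ++ x :: rest) ((q.length : Int) + 1) v
            = insStep (q ++ [b]) v ++ rest
      have h1 : ((q.length : Int) + 1) = (((q ++ [b]).length : Nat) : Int) := by simp
      rw [h1, pySetD_append_cons]
      have htw : (q ++ [b]).takeWhile (fun a => decide (a ≤ v)) = q ++ [b] :=
        List.takeWhile_eq_self_iff.mpr (by
          intro a ha
          simp only [List.mem_append, List.mem_singleton] at ha
          rcases ha with ha | ha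
          · exact decide_eq_true (le_trans (hqb a ha) hbv)
          · exact decide_eq_true (ha ▸ hbv))
      have hdw : (q ++ [b]).dropWhile (fun a => decide (a ≤ v)) = [] :=
        List.dropWhile_eq_nil_iff.mpr (by
          intro a ha
          simp only [List.mem_append, List.mem_singleton] at ha
          rcases ha with ha | ha
          · exact decide_eq_true (le_trans (hqb a ha) hbv)
          · exact decide_eq_true (ha ▸ hbv))
      simp [insStep, htw, hdw]
    · have hcond : ((q.length : Int) > -1) ∧ (b > v) := ⟨by omega, by omega⟩
      rw [dif_pos hcond]
      have hset : PySem.List.pySetD ((q ++ [b]) ++ x :: rest) ((q.length : Int) + 1) b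
            = q ++ b :: (b :: rest) := by
        have h1 : ((q.length : Int) + 1) = (((q ++ [b]).length : Nat) : Int) := by simp
        rw [h1, pySetD_append_cons]; simp
      rw [hset]
      -- the recursive state is exactly ih's statement
      rw [ih hq b (b :: rest) v]
      have hb' : (fun a : Int => decide (a ≤ v)) b = false := by simp [hbv]
      rw [insStep, insStep, takeWhile_snoc_neg q b (fun a : Int => decide (a ≤ v)) hb',
        dropWhile_snoc_neg q b (fun a : Int => decide (a ≤ v)) hb']
      simp

lemma insStep_length (p : List Int) (v : Int) : (insStep p v).length = p.length + 1 := by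
  have h : (p.takeWhile (fun b => decide (b ≤ v))).length
      + (p.dropWhile (fun b => decide (b ≤ v))).length = p.length := by
    rw [← List.length_append, List.takeWhile_append_dropWhile]
  rw [insStep]
  simp only [List.length_append, List.length_cons]
  omega

lemma insStep_pairwise (p : List Int) (hp : p.Pairwise (· ≤ ·)) (v : Int) :
    (insStep p v).Pairwise (· ≤ ·) := by
  have hsplit : p.takeWhile (fun b => decide (b ≤ v)) ++ p.dropWhile (fun b => decide (b ≤ v)) = p :=
    List.takeWhile_append_dropWhile
  have hp' : (p.takeWhile (fun b => decide (b ≤ v)) ++ p.dropWhile (fun b => decide (b ≤ v))).Pairwise (· ≤ ·) := by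
    rw [hsplit]; exact hp
  rw [List.pairwise_append] at hp'
  obtain ⟨htw, hdw, hcross⟩ := hp'
  have htwle : ∀ a ∈ p.takeWhile (fun b => decide (b ≤ v)), a ≤ v := by
    intro a ha
    simpa using List.mem_takeWhile_imp ha
  have hdwge : ∀ a ∈ p.dropWhile (fun b => decide (b ≤ v)), v ≤ a := by
    cases hd : p.dropWhile (fun b => decide (b ≤ v)) with
    | nil => intro a ha; simp at ha
    | cons h t =>
      have hhead : ¬ (h ≤ v) := by
        have := List.head_dropWhile_not (fun b => decide (b ≤ v)) (l := p)
        rw [hd] at this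
        simpa using this (by simp)
      intro a ha
      rcases List.mem_cons.mp ha with rfl | ha
      · omega
      · have : h ≤ a := by
          rw [hd] at hdw
          exact (List.pairwise_cons.mp hdw).1 a ha
        omega
  rw [insStep, List.pairwise_append]
  refine ⟨htw, List.pairwise_cons.mpr ⟨fun a ha => hdwge a ha, hdw⟩, ?_⟩
  intro a ha b hb
  rcases List.mem_cons.mp hb with rfl | hb
  · exact htwle a ha
  · exact hcross a ha b hb

lemma insStep_perm (p : List Int) (v : Int) : (insStep p v).Perm (v :: p) := by
  have h := List.perm_middle (a := v) (l₁ := p.takeWhile (fun b => decide (b ≤ v)))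
    (l₂ := p.dropWhile (fun b => decide (b ≤ v)))
  simpa [insStep, List.takeWhile_append_dropWhile] using h

lemma foldl_insStep_pairwise (rest p : List Int) (hp : p.Pairwise (· ≤ ·)) :
    (rest.foldl insStep p).Pairwise (· ≤ ·) := by
  induction rest generalizing p with
  | nil => exact hp
  | cons x xs ih => exact ih _ (insStep_pairwise p hp x)

lemma foldl_insStep_perm (rest p : List Int) : (rest.foldl insStep p).Perm (p ++ rest) := by
  induction rest generalizing p with
  | nil => simp
  | cons x xs ih =>
    refine ((ih (insStep p x)).trans ?_)
    exact ((insStep_perm p x).append_right xs).trans List.perm_middle.symm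

lemma outer_spec : ∀ (rest p : List Int), p.Pairwise (· ≤ ·) →
    (PySem.List.pyRange ((p.length : Nat) : Int) (((p.length + rest.length : Nat)) : Int) 1).foldl
      insSortStep (p ++ rest)
      = rest.foldl insStep p := by
  intro rest
  induction rest with
  | nil =>
    intro p _
    simp [PySem.List.pyRange]
  | cons x xs ih =>
    intro p hp
    have hlt : ((p.length : Nat) : Int) < (((p.length + (x :: xs).length : Nat)) : Int) := by
      simp
    rw [PySem.List.pyRange_one_cons hlt, List.foldl_cons]
    have hval : PySem.List.pyGetD (p ++ x :: xs) ((p.length : Nat) : Int) 0 = x :=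
      pyGetD_append_cons p x xs
    have hstep := inner_spec p hp x xs x
    have hbody : insSortStep (p ++ x :: xs) ((p.length : Nat) : Int) = insStep p x ++ xs := by
      rw [insSortStep]
      simp only [hval]
      exact hstep
    rw [hbody]
    have hlen2 : ((p.length : Nat) : Int) + 1 = (((insStep p x).length : Nat) : Int) := by
      rw [insStep_length]; push_cast; ring
    have hlen3 : (((p.length + (x :: xs).length : Nat)) : Int)
        = ((((insStep p x).length + xs.length : Nat)) : Int) := by
      rw [insStep_length]; push_cast; simp; ring
    rw [hlen2, hlen3]
    exact ih (insStep p x) (insStep_pairwise p hp x)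

lemma insertion_sort_eq_sorted (l : List Int) :
    insertion_sort l = PySem.List.sorted l (fun x => x) false := by
  cases l with
  | nil =>
    rfl
  | cons x xs =>
    have h := outer_spec xs [x] (by simp)
    have harg1 : ((([x] : List Int).length : Nat) : Int) = (1 : Int) := by simp
    have harg2 : (((([x] : List Int).length + xs.length : Nat)) : Int) = ((x :: xs).length : Int) := by
      simp [Nat.add_comm]
    rw [harg1, harg2] at h
    have hres : insertion_sort (x :: xs) = xs.foldl insStep [x] := by
      unfold insertion_sort
      exact h
    rw [hres]
    exact (PySem.List.sorted_id_eq_of_perm_of_pairwise _ _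
      ((foldl_insStep_perm xs [x]).trans (by simp))
      (foldl_insStep_pairwise xs [x] (by simp))).symm

lemma mergeB_cons_cons (x : Int) (xs : List Int) (y : Int) (ys : List Int) :
    mergeB (x :: xs) (y :: ys)
      = if x < y then x :: mergeB xs (y :: ys) else y :: mergeB (x :: xs) ys := by
  rw [mergeB]

lemma mergeB_nil_right : ∀ xs : List Int, mergeB xs [] = xs := by
  intro xs; cases xs <;> simp [mergeB]

lemma merge_spec (u s : List Int) : ∀ (n : Nat) (i j : Int) (acc : List Int), 0 ≤ i → 0 ≤ j →
    (((u.length : Int) - i) + ((s.length : Int) - j)).toNat = n →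
    (fun r => r.1 ++ PySem.List.slice u (some r.2.1) none ++ PySem.List.slice s (some r.2.2) none)
        (mergeLoopA u s u.length s.length i j acc)
      = acc ++ mergeB (u.drop i.toNat) (s.drop j.toNat) := by
  intro n
  induction n using Nat.strong_induction_on with
  | _ n ihn =>
    intro i j acc hi hj hn
    rw [mergeLoopA]
    by_cases h : i < (u.length : Int) ∧ j < (s.length : Int)
    · rw [dif_pos h]
      have hui : i.toNat < u.length := by omega
      have hsj : j.toNat < s.length := by omega
      have hgu : PySem.List.pyGetD u i 0 = u[i.toNat] :=
        PySem.List.pyGetD_eq_getElem u 0 hi h.1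
      have hgs : PySem.List.pyGetD s j 0 = s[j.toNat] :=
        PySem.List.pyGetD_eq_getElem s 0 hj h.2
      have hdu : u.drop i.toNat = u[i.toNat] :: u.drop (i.toNat + 1) :=
        (List.getElem_cons_drop hui).symm
      have hds : s.drop j.toNat = s[j.toNat] :: s.drop (j.toNat + 1) :=
        (List.getElem_cons_drop hsj).symm
      rw [hgu, hgs]
      by_cases hc : u[i.toNat] < s[j.toNat]
      · rw [if_pos hc]
        have hrec := ihn ((((u.length : Int) - (i+1)) + ((s.length : Int) - j)).toNat)
          (by omega) (i+1) j (acc ++ [u[i.toNat]]) (by omega) hj rfl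
        rw [hrec]
        have hi1 : (i + 1).toNat = i.toNat + 1 := by omega
        rw [hi1]
        conv_rhs => rw [hdu, hds, mergeB_cons_cons]
        rw [if_pos hc, hds]
        simp
      · rw [if_neg hc]
        have hrec := ihn ((((u.length : Int) - i) + ((s.length : Int) - (j+1))).toNat)
          (by omega) i (j+1) (acc ++ [s[j.toNat]]) hi (by omega) rfl
        rw [hrec]
        have hj1 : (j + 1).toNat = j.toNat + 1 := by omega
        rw [hj1]
        conv_rhs => rw [hdu, hds, mergeB_cons_cons]
        rw [if_neg hc, hdu]
        simp
    · rw [dif_neg h]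
      have hslu : PySem.List.slice u (some i) none = u.drop i.toNat := by
        rw [show i = ((i.toNat : Nat) : Int) from (Int.toNat_of_nonneg hi).symm,
          PySem.List.slice_from_natCast]
        simp
        omega
      have hsls : PySem.List.slice s (some j) none = s.drop j.toNat := by
        rw [show j = ((j.toNat : Nat) : Int) from (Int.toNat_of_nonneg hj).symm,
          PySem.List.slice_from_natCast]
        simp
        omega
      simp only [hslu, hsls]
      rcases not_and_or.mp h with hcase | hcase
      · have : u.drop i.toNat = [] := List.drop_eq_nil_of_le (by omega)
        rw [this]
        simp [mergeB]
      · have : s.drop j.toNat = [] := List.drop_eq_nil_of_le (by omega)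
        rw [this, mergeB_nil_right]
        simp

-- ===== VERDICT (by name: the statement is the Claim_ definition above) =====
theorem join_lists_spec : Claim_equal_join_lists := by
  intro u s _
  show join_lists u s = join_lists_alt u s
  unfold join_lists join_lists_alt
  simp only [insertion_sort_eq_sorted]
  have h := merge_spec (PySem.List.sorted u (fun x => x) false) s
    ((((PySem.List.sorted u (fun x => x) false).length : Int) - 0) + ((s.length : Int) - 0)).toNat
    0 0 [] le_rfl le_rfl rfl
  simp only [Int.toNat_zero, List.drop_zero, List.nil_append] at h
  simp only [h]
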